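-- pv_equiv track=rewrite | github.com/Gayan-98/FarmerSmart | backend/app.py | determine_seed_class
-- ===== SOURCE A (Python) =====
-- def determine_seed_class(seed_counts):
--     # Filter out rice_seeds and zero counts
--     filtered_counts = {k: v for k, v in seed_counts.items() if k != 'rice_seeds' and v > 0}
--
--     if not filtered_counts:
--         return "NONE"  # No seeds detected
--
--     # Find the seed type with the highest count
--     highest_seed_type = max(filtered_counts, key=filtered_counts.get)
--
--     # Determine class based on the highest seed type
--     if highest_seed_type == 'saromacca_grass':
--         return "A"
--     elif highest_seed_type == 'barnyardgrass':
--         return "B"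
--     elif highest_seed_type == 'jungle_rice':
--         return "C"
--     else:
--         return "NONE"  # Default case
-- ===== SOURCE B (Python) =====
-- def determine_seed_class(seed_counts):
--     # Rank eligible seeds by count, stable descending sort; the top entry is the
--     # first-occurring maximum (stability), then read its class off a table.
--     eligible = [(k, v) for k, v in seed_counts.items() if k != 'rice_seeds' and v > 0]
--     ranked = sorted(eligible, key=lambda kv: kv[1], reverse=True)
--     if not ranked:
--         return "NONE"
--     classes = {'saromacca_grass': 'A', 'barnyardgrass': 'B', 'jungle_rice': 'C'}
--     return classes.get(ranked[0][0], "NONE")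
-- ===== Notes on version B (the rewrite author's own statement) =====
-- stated objective: alternative
-- what changed: Replaces A's linear argmax (dict comprehension then max with repeated .get lookups then an if/elif chain) by a sort-then-pick algorithm: filter eligible items, stable-sort them descending by count so the first-occurring maximum ends up at the head, and map that key through a class table.
import Mathlib
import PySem

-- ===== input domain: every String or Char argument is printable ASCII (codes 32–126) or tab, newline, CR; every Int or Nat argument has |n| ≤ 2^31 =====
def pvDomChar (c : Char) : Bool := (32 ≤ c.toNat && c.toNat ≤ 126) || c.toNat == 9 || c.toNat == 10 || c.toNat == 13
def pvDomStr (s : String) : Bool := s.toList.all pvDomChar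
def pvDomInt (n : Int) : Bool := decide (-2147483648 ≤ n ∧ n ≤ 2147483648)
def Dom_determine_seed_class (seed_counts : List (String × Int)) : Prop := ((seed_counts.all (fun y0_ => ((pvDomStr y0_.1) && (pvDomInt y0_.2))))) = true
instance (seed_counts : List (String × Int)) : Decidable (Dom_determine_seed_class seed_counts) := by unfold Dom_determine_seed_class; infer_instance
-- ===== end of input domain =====

-- B replaces A's linear argmax (filtered dict, then max over it) by sort-then-pick:
-- stable descending sort of the eligible items, head = first-occurring maximum, class table lookup
-- (objective: alternative).

-- ===== PORT A =====
-- A's dict comprehension: fold over the items, inserting the pairs that pass the filter.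
def pvFilteredCounts (items : List (String × Int)) : PySem.Dict String Int :=
  items.foldl (fun acc kv => if kv.1 ≠ "rice_seeds" ∧ 0 < kv.2 then acc.insert kv.1 kv.2 else acc) PySem.Dict.empty

-- Port of A. Every key of the filtered dict is present, so key=filtered_counts.get is getD _ 0.
def determine_seed_class (seed_counts : List (String × Int)) : String :=
  let filtered := pvFilteredCounts (PySem.Dict.ofList seed_counts).items
  if filtered.items = [] then "NONE"
  else
    match PySem.List.max? filtered.keys (fun k => filtered.getD k 0) with
    | none => "NONE"
    | some h =>
      if h = "saromacca_grass" then "A"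
      else if h = "barnyardgrass" then "B"
      else if h = "jungle_rice" then "C"
      else "NONE"

-- ===== PORT B =====
-- Port of B: comprehension (fold appending the passing pairs), stable reverse sort by count,
-- head's key through the literal class dict's .get.
def determine_seed_class_alt (seed_counts : List (String × Int)) : String :=
  let eligible := (PySem.Dict.ofList seed_counts).items.foldl
    (fun acc kv => if kv.1 ≠ "rice_seeds" ∧ 0 < kv.2 then acc ++ [kv] else acc) []
  let ranked := PySem.List.sorted eligible (fun kv => kv.2) true
  match ranked with
  | [] => "NONE"
  | b :: _ =>
      (PySem.Dict.ofList [("saromacca_grass", "A"), ("barnyardgrass", "B"), ("jungle_rice", "C")]).getD b.1 "NONE"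

-- ===== PRECONDITION & SPEC =====
def Spec_determine_seed_class (seed_counts : List (String × Int)) (out : String) : Prop := out = determine_seed_class_alt seed_counts
instance (seed_counts : List (String × Int)) (out : String) : Decidable (Spec_determine_seed_class seed_counts out) := by unfold Spec_determine_seed_class; infer_instance

-- ===== CLAIM (what is proved, stated in full; the proofs are below) =====
def Claim_equal_determine_seed_class : Prop := ∀ (seed_counts : List (String × Int)), Dom_determine_seed_class seed_counts → Spec_determine_seed_class seed_counts (determine_seed_class seed_counts)

-- ===== LEMMAS AND PROOFS =====

-- first-max step over pairs (proof-side common form of both programs' extremum)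
def pvStep (best : Option (String × Int)) (kv : String × Int) : Option (String × Int) :=
  match best with
  | none => some kv
  | some b => if kv.2 > b.2 then some kv else best

-- the running first-max step over keys, with values looked up through val
def pvKeyStep (val : String → Int) (m : Option String) (x : String) : Option String :=
  match m with
  | none => some x
  | some m' => if val m' < val x then some x else some m'

-- first-max over the keys (with a value table agreeing with the pairs) is the fused pair scan
theorem pv_max_keys_eq_step_fold (val : String → Int) :
    ∀ (L : List (String × Int)) (acc : Option (String × Int)),
      (∀ kv ∈ L, val kv.1 = kv.2) →
      (∀ b, acc = some b → val b.1 = b.2) →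
      (L.map Prod.fst).foldl (pvKeyStep val) (acc.map Prod.fst)
        = (L.foldl pvStep acc).map Prod.fst := by
  intro L
  induction L with
  | nil => intro acc _ _; rfl
  | cons kv t ih =>
    intro acc hL hacc
    have hkv : val kv.1 = kv.2 := hL kv (by simp)
    have ht : ∀ p ∈ t, val p.1 = p.2 := fun p hp => hL p (List.mem_cons_of_mem _ hp)
    cases acc with
    | none =>
      simp only [List.map_cons, List.foldl_cons, Option.map_none]
      exact ih (some kv) ht (by intro b hb; cases hb; exact hkv)
    | some b =>
      have hb : val b.1 = b.2 := hacc b rfl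
      simp only [List.map_cons, List.foldl_cons, Option.map_some, pvStep, pvKeyStep]
      rw [hb, hkv]
      by_cases h : b.2 < kv.2
      · simp only [gt_iff_lt, if_pos h]
        exact ih (some kv) ht (by intro c hc; cases hc; exact hkv)
      · simp only [gt_iff_lt, if_neg h]
        exact ih (some b) ht (by intro c hc; cases hc; exact hb)

-- head of an insertBy-fold: insertBy only touches the head when 'before' fires there,
-- so the head of the accumulated list evolves exactly by the first-max step
theorem pv_head_insertBy (before : (String × Int) → (String × Int) → Bool)
    (x : String × Int) (acc : List (String × Int)) :
    (PySem.List.insertBy before x acc).head?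
      = match acc.head? with
        | none => some x
        | some y => if before x y then some x else some y := by
  cases acc with
  | nil => rfl
  | cons y ys =>
    simp only [PySem.List.insertBy, List.head?_cons]
    by_cases h : before x y = true <;> simp [h]

theorem pv_head_foldl_insertBy :
    ∀ (L : List (String × Int)) (acc : List (String × Int)),
      (L.foldl (fun acc x => PySem.List.insertBy (fun a b => decide (b.2 < a.2)) x acc) acc).head?
        = L.foldl pvStep acc.head? := by
  intro L
  induction L with
  | nil => intro acc; rfl
  | cons x t ih =>
    intro acc
    simp only [List.foldl_cons]
    rw [ih]
    congr 1
    rw [pv_head_insertBy]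
    cases acc with
    | nil => rfl
    | cons y ys =>
      simp only [List.head?_cons, pvStep, gt_iff_lt]
      by_cases h : y.2 < x.2 <;> simp [h]

-- the literal class dict is the if/elif chain
theorem pv_classify (k : String) :
    (PySem.Dict.ofList [("saromacca_grass", "A"), ("barnyardgrass", "B"), ("jungle_rice", "C")]).getD k "NONE"
      = if k = "saromacca_grass" then "A"
        else if k = "barnyardgrass" then "B"
        else if k = "jungle_rice" then "C"
        else "NONE" := by
  rw [show PySem.Dict.ofList [("saromacca_grass", "A"), ("barnyardgrass", "B"), ("jungle_rice", "C")] = PySem.Dict.mk [("saromacca_grass", "A"), ("barnyardgrass", "B"), ("jungle_rice", "C")] from rfl]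
  rw [PySem.Dict.getD_eq_get?_getD, PySem.Dict.get?_mk_cons, PySem.Dict.get?_mk_cons, PySem.Dict.get?_mk_cons]
  by_cases h1 : k = "saromacca_grass"
  · subst h1; rfl
  by_cases h2 : k = "barnyardgrass"
  · subst h2; rfl
  by_cases h3 : k = "jungle_rice"
  · subst h3; rfl
  have b1 : ("saromacca_grass" == k) = false := beq_eq_false_iff_ne.mpr (Ne.symm h1)
  have b2 : ("barnyardgrass" == k) = false := beq_eq_false_iff_ne.mpr (Ne.symm h2)
  have b3 : ("jungle_rice" == k) = false := beq_eq_false_iff_ne.mpr (Ne.symm h3)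
  simp [b1, b2, b3, h1, h2, h3]
  rfl

-- a fold whose body applies only on c is the plain fold over the c-filtered list
theorem pv_foldl_keep {α β : Type} (f : β → α → β) (c : α → Prop) [DecidablePred c] :
    ∀ (l : List α) (init : β),
      l.foldl (fun acc x => if c x then f acc x else acc) init
        = (l.filter (fun x => decide (c x))).foldl f init := by
  intro l
  induction l with
  | nil => intro init; rfl
  | cons x t ih =>
    intro init
    by_cases hx : c x <;> simp [hx, ih]

-- the filtered dict's items are exactly the filtered items list
theorem pv_filtered_items (l : List (String × Int)) (hnd : (l.map Prod.fst).Nodup) :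
    (pvFilteredCounts l).items = l.filter (fun kv => decide (kv.1 ≠ "rice_seeds" ∧ 0 < kv.2)) := by
  unfold pvFilteredCounts
  rw [pv_foldl_keep (fun acc kv => acc.insert kv.1 kv.2) (fun kv => kv.1 ≠ "rice_seeds" ∧ 0 < kv.2) l PySem.Dict.empty]
  have h := PySem.Dict.items_foldl_insert_fresh
      (l := l.filter (fun kv => decide (kv.1 ≠ "rice_seeds" ∧ 0 < kv.2)))
      (k := fun a => a.1) (v := fun a => a.2) (d := PySem.Dict.empty)
      (by intro a _; exact PySem.Dict.contains_empty a.1)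
      (hnd.sublist (List.filter_sublist.map Prod.fst))
  simpa using h

-- ===== VERDICT (by name: the statement is the Claim_ definition above) =====
theorem determine_seed_class_spec : Claim_equal_determine_seed_class := by
  intro sc _
  simp only [Spec_determine_seed_class, determine_seed_class, determine_seed_class_alt]
  set l := (PySem.Dict.ofList sc).items with hl
  have hnd : (l.map Prod.fst).Nodup := by
    have h := PySem.Dict.nodup_keys_ofList (ps := sc)
    simpa [PySem.Dict.keys, hl] using h
  set L := l.filter (fun kv => decide (kv.1 ≠ "rice_seeds" ∧ 0 < kv.2)) with hLdef
  have hitems : (pvFilteredCounts l).items = L := pv_filtered_items l hnd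
  have hndL : (L.map Prod.fst).Nodup := hnd.sublist (List.filter_sublist.map Prod.fst)
  have hkeys : (pvFilteredCounts l).keys = L.map Prod.fst := by
    simp [PySem.Dict.keys, hitems]
  have hval : ∀ kv ∈ L, (pvFilteredCounts l).getD kv.1 0 = kv.2 := by
    intro kv hkv
    have hmem : (kv.1, kv.2) ∈ (pvFilteredCounts l).items := by rw [hitems]; exact hkv
    have hkn : (pvFilteredCounts l).keys.Nodup := by rw [hkeys]; exact hndL
    exact PySem.Dict.getD_of_mem_items _ hmem hkn 0
  -- B side: the comprehension fold is the filter, and the head of the reverse sort is the first max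
  have helig : l.foldl (fun acc kv => if kv.1 ≠ "rice_seeds" ∧ 0 < kv.2 then acc ++ [kv] else acc) [] = L := by
    have h := PySem.List.foldl_append_ite_eq_filter
      (p := fun kv : String × Int => kv.1 ≠ "rice_seeds" ∧ 0 < kv.2) (l := l) (acc := [])
    simp only [List.nil_append] at h
    rw [h, hLdef]
  have hsorted : PySem.List.sorted L (fun kv => kv.2) true
      = L.foldl (fun acc x => PySem.List.insertBy (fun a b => decide (b.2 < a.2)) x acc) [] := by
    have h := PySem.List.sorted_rev_eq_foldl_insertBy L (fun kv : String × Int => kv.2)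
    simpa using h
  have hhead : (PySem.List.sorted L (fun kv => kv.2) true).head? = L.foldl pvStep none := by
    rw [hsorted, pv_head_foldl_insertBy]
    rfl
  have hmax : PySem.List.max? (L.map Prod.fst) (fun k => (pvFilteredCounts l).getD k 0)
      = (L.foldl pvStep none).map Prod.fst := by
    have hdef : PySem.List.max? (L.map Prod.fst) (fun k => (pvFilteredCounts l).getD k 0)
        = (L.map Prod.fst).foldl (pvKeyStep (fun k => (pvFilteredCounts l).getD k 0)) none := by
      unfold PySem.List.max?
      congr 1
      funext m x
      cases m <;> rfl
    rw [hdef]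
    have h := pv_max_keys_eq_step_fold (fun k => (pvFilteredCounts l).getD k 0) L none hval
      (by intro b hb; cases hb)
    simpa using h
  rw [hitems, hkeys, hmax, helig]
  by_cases hL : L = []
  · rw [if_pos hL, hL]
    rfl
  · rw [if_neg hL]
    cases hranked : PySem.List.sorted L (fun kv => kv.2) true with
    | nil => exact absurd ((PySem.List.sorted_eq_nil_iff L (fun kv => kv.2) true).mp hranked) hL
    | cons b t =>
      have hb : L.foldl pvStep none = some b := by
        rw [← hhead, hranked]; rfl
      rw [hb]
      simp only [Option.map_some]
      exact (pv_classify b.1).symm
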